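-- pv_equiv track=rewrite | github.com/makalin/tldrpp | tldrpp/app.py | _is_destructive_command
-- ===== SOURCE A (Python) =====
-- def _is_destructive_command(command: str) -> bool:
--     """Check if a command is potentially destructive."""
--     destructive_verbs = [
--         "rm", "rmdir", "del", "erase",
--         "dd", "mkfs", "fdisk", "parted",
--         "iptables", "ufw", "firewall-cmd",
--         "chmod", "chown", "chattr",
--         "kill", "killall", "pkill",
--         "shutdown", "reboot", "halt",
--         "mv", "move", "rename",
--         "cp", "copy", "xcopy",
--         "tar", "zip", "unzip",
--         "git", "svn", "hg",
--     ]
--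
--     command_lower = command.lower()
--     for verb in destructive_verbs:
--         if command_lower.startswith(f"{verb} ") or command_lower == verb:
--             return True
--     return False
-- ===== SOURCE B (Python) =====
-- _DESTRUCTIVE_VERBS = frozenset(
--     "rm rmdir del erase dd mkfs fdisk parted iptables ufw firewall-cmd "
--     "chmod chown chattr kill killall pkill shutdown reboot halt "
--     "mv move rename cp copy xcopy tar zip unzip git svn hg".split()
-- )
--
--
-- def _is_destructive_command(command: str) -> bool:
--     """Check if a command is potentially destructive."""
--     lowered = command.lower()
--     cut = lowered.find(" ")
--     first = lowered if cut < 0 else lowered[:cut]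
--     return first in _DESTRUCTIVE_VERBS
-- ===== Notes on version B (the rewrite author's own statement) =====
-- stated objective: idiomatic
-- what changed: Instead of scanning all 32 verbs testing startswith of the verb plus a trailing space or whole-string equality, B locates the first space with str.find, slices the first token out once, and answers with a single frozenset membership lookup; the verb set itself is built by splitting one literal string instead of a hand-written list.
import Mathlib
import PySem

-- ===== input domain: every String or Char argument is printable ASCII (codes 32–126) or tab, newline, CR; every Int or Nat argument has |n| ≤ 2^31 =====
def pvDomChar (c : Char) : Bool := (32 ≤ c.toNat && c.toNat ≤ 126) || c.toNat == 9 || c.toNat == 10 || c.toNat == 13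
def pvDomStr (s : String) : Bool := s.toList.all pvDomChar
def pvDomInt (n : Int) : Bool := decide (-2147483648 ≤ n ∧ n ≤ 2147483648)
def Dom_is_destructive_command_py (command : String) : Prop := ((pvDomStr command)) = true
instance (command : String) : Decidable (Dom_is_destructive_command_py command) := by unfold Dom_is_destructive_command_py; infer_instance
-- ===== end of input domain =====

-- B finds the first space with str.find, slices the first token out once, and does one
-- set-membership lookup (verb set built by splitting a literal),
-- replacing A's per-verb startswith/equality scan (idiomatic; same asymptotic cost).


-- ===== PORT A =====
def pvDestructiveVerbs : List String :=
  ["rm", "rmdir", "del", "erase",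
   "dd", "mkfs", "fdisk", "parted",
   "iptables", "ufw", "firewall-cmd",
   "chmod", "chown", "chattr",
   "kill", "killall", "pkill",
   "shutdown", "reboot", "halt",
   "mv", "move", "rename",
   "cp", "copy", "xcopy",
   "tar", "zip", "unzip",
   "git", "svn", "hg"]

def is_destructive_command_py (command : String) : Bool :=
  let command_lower := PySem.Str.lower command
  pvDestructiveVerbs.any (fun verb =>
    PySem.Str.startswith command_lower (verb ++ " ") || command_lower == verb)

-- ===== PORT B =====
def pvDestructiveSet : PySem.Set String :=
  PySem.Set.ofList (PySem.Str.split₀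
    "rm rmdir del erase dd mkfs fdisk parted iptables ufw firewall-cmd chmod chown chattr kill killall pkill shutdown reboot halt mv move rename cp copy xcopy tar zip unzip git svn hg")

def is_destructive_command_py_alt (command : String) : Bool :=
  let lowered := PySem.Str.lower command
  let cut := PySem.Str.find lowered " "
  let first := if cut < 0 then lowered else PySem.Str.slice lowered none (some cut)
  PySem.Set.contains pvDestructiveSet first

-- ===== PRECONDITION & SPEC =====
def Spec_is_destructive_command_py (command : String) (out : Bool) : Prop := out = is_destructive_command_py_alt command
instance (command : String) (out : Bool) : Decidable (Spec_is_destructive_command_py command out) := by unfold Spec_is_destructive_command_py; infer_instance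

-- ===== CLAIM (what is proved, stated in full; the proofs are below) =====
def Claim_equal_is_destructive_command_py : Prop := ∀ (command : String), Dom_is_destructive_command_py command → Spec_is_destructive_command_py command (is_destructive_command_py command)

-- ===== LEMMAS AND PROOFS =====

-- first token (up to the first space) of a character list
def pvFt (s : List Char) : List Char := s.takeWhile (fun c => c != ' ')

-- the literal-splitting set underlying B is exactly A's verb list
set_option maxRecDepth 10000 in
theorem pv_set_eq : pvDestructiveSet = pvDestructiveVerbs := by decide

-- takeWhile as a take at the first failure point
theorem pv_takeWhile_eq_take (p : Char → Bool) (s : List Char) (n : Nat)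
    (hn : n ≤ s.length)
    (h1 : ∀ i (h : i < n), p (s[i]'(Nat.lt_of_lt_of_le h hn)) = true)
    (h2 : ∀ (h : n < s.length), p (s[n]'h) = false) :
    s.takeWhile p = s.take n := by
  induction s generalizing n with
  | nil => simp at hn; simp [hn]
  | cons c t ih =>
    cases n with
    | zero =>
      have := h2 (by simp)
      simp at this
      simp [List.takeWhile, this]
    | succ m =>
      have hc : p c = true := by simpa using h1 0 (Nat.succ_pos m)
      simp [List.takeWhile, hc]
      exact ih m (by simpa using hn)
        (fun i h => by simpa using h1 (i + 1) (by omega))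
        (fun h => by simpa using h2 (by simpa using h))

-- single-char prefix-of-drop is just the character at that index
theorem pv_space_prefix_iff (s : List Char) (i : Nat) (hi : i < s.length) :
    ([' '] <+: s.drop i) ↔ s[i] = ' ' := by
  constructor
  · rintro ⟨t, ht⟩
    have : s.drop i = ' ' :: t := by simpa using ht.symm
    have := congrArg List.head? this
    simpa [List.head?_drop, List.getElem?_eq_getElem hi] using this
  · intro h
    have hd : s.drop i = s[i] :: s.drop (i + 1) := List.drop_eq_getElem_cons hi
    exact ⟨s.drop (i + 1), by rw [hd, h]; rfl⟩

-- B's sliced first token is exactly pvFt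
theorem pv_first_eq (s : List Char) :
    (if PySem.Chars.find s [' '] < 0 then s
     else PySem.Chars.slice s none (some (PySem.Chars.find s [' ']))) = pvFt s := by
  by_cases hneg : PySem.Chars.find s [' '] < 0
  · have hm1 : PySem.Chars.find s [' '] = -1 := by
      have := PySem.Chars.neg_one_le_find s [' ']
      omega
    have hnin : ¬ ([' '] <:+: s) := (PySem.Chars.find_eq_neg_one_iff s [' ']).mp hm1
    rw [if_pos hneg]
    symm
    apply List.takeWhile_eq_self_iff.mpr
    intro a ha
    simp only [bne_iff_ne, ne_eq]
    intro h
    exact hnin ((List.singleton_infix_iff ' ' s).mpr (h ▸ ha))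
  · rw [if_neg hneg]
    rw [not_lt] at hneg
    obtain ⟨hpre, hmin⟩ := PySem.Chars.find_spec (s := s) (sub := [' ']) hneg
    set n := (PySem.Chars.find s [' ']).toNat with hn
    have hfind : PySem.Chars.find s [' '] = (n : Int) := by omega
    have hlen : n < s.length := by
      rcases hpre with ⟨t, ht⟩
      have := congrArg List.length ht
      simp at this
      omega
    rw [hfind, PySem.Chars.slice_eq_listSlice, PySem.List.slice_to _ (by omega)]
    symm
    simp only [Int.toNat_natCast]
    apply pv_takeWhile_eq_take _ _ _ (by omega)
    · intro i h
      have hne : s[i] ≠ ' ' := fun hsp =>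
        hmin i h ((pv_space_prefix_iff s i (by omega)).mpr hsp)
      simpa using hne
    · intro h
      have : s[n] = ' ' := (pv_space_prefix_iff s n h).mp hpre
      simp [this]

-- A's per-verb test agrees with "first token equals the verb" for space-free verbs
theorem pv_tok (v s : List Char) (hv : ' ' ∉ v) :
    ((v ++ [' ']) <+: s ∨ s = v) ↔ pvFt s = v := by
  constructor
  · rintro (⟨t, ht⟩ | rfl)
    · subst ht
      have hvself : v.takeWhile (fun c => c != ' ') = v := by
        apply List.takeWhile_eq_self_iff.mpr
        intro a ha
        simp only [bne_iff_ne, ne_eq]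
        exact fun h => hv (h ▸ ha)
      simp [pvFt, List.takeWhile_append, hvself]
    · simp only [pvFt]
      apply List.takeWhile_eq_self_iff.mpr
      intro a ha
      simp only [bne_iff_ne, ne_eq]
      exact fun h => hv (h ▸ ha)
  · intro h
    simp only [pvFt] at h
    rcases hd : s.dropWhile (fun c => c != ' ') with _ | ⟨d, ds⟩
    · right
      have := List.takeWhile_append_dropWhile (p := fun c => c != ' ') (l := s)
      rw [h, hd] at this
      simpa using this.symm
    · left
      have hdp : (fun c => c != ' ') d = false := by
        have := List.head_dropWhile_not (p := fun c => c != ' ') (l := s)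
          (by simp [hd])
        simpa [hd] using this
      have hd' : d = ' ' := by simpa using hdp
      refine ⟨ds, ?_⟩
      have := List.takeWhile_append_dropWhile (p := fun c => c != ' ') (l := s)
      rw [h, hd, hd'] at this
      simpa using this

theorem pv_any_congr {α : Type} (l : List α) (p q : α → Bool)
    (h : ∀ a ∈ l, p a = q a) : l.any p = l.any q := by
  induction l with
  | nil => rfl
  | cons a t ih =>
    simp only [List.any_cons, h a (by simp), ih (fun b hb => h b (by simp [hb]))]

theorem pv_no_space : ∀ v ∈ pvDestructiveVerbs, ' ' ∉ v.toList := by decide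

-- ===== VERDICT (by name: the statement is the Claim_ definition above) =====
set_option maxHeartbeats 1000000 in
theorem is_destructive_command_py_spec : Claim_equal_is_destructive_command_py := by
  intro command _
  unfold Spec_is_destructive_command_py
  unfold is_destructive_command_py is_destructive_command_py_alt
  set lower := PySem.Str.lower command with hlow
  -- B's first token is pvFt of the lowered characters
  have hfindeq : PySem.Str.find lower " " = PySem.Chars.find lower.toList [' '] := by
    simp [PySem.Str.find_eq]
  have hfirst : (if PySem.Str.find lower " " < 0 then lower
      else PySem.Str.slice lower none (some (PySem.Str.find lower " ")))
      = String.ofList (pvFt lower.toList) := by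
    rw [hfindeq]
    by_cases hneg : PySem.Chars.find lower.toList [' '] < 0
    · rw [if_pos hneg]
      have := pv_first_eq lower.toList
      rw [if_pos hneg] at this
      rw [← this]
      exact String.ofList_toList.symm
    · rw [if_neg hneg]
      have := pv_first_eq lower.toList
      rw [if_neg hneg] at this
      apply String.toList_inj.mp
      rw [PySem.Str.toList_slice, String.toList_ofList]
      simpa using this
  simp only []
  rw [hfirst]
  -- membership in the split-built set = any over A's verb list
  have hmem : PySem.Set.contains pvDestructiveSet (String.ofList (pvFt lower.toList))
      = (pvDestructiveVerbs.any (fun v => String.ofList (pvFt lower.toList) == v)) := by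
    rw [pv_set_eq]
    simp only [PySem.Set.contains, List.contains_eq_any_beq]
  rw [hmem]
  -- per-verb agreement
  apply pv_any_congr
  intro v hvmem
  have hv := pv_no_space v hvmem
  have key := pv_tok v.toList lower.toList hv
  cases hb : (String.ofList (pvFt lower.toList) == v) with
  | false =>
    simp only [beq_eq_false_iff_ne, ne_eq] at hb
    apply Bool.or_eq_false_iff.mpr
    constructor
    · apply Bool.eq_false_iff.mpr
      intro hs
      have hpre : (v ++ " ").toList <+: lower.toList :=
        (PySem.Chars.startswith_iff _ _).mp (by simpa using hs)
      have hpre' : (v.toList ++ [' ']) <+: lower.toList := by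
        simpa using hpre
      have := key.mp (Or.inl hpre')
      exact hb (by rw [this]; simp)
    · apply Bool.eq_false_iff.mpr
      intro hs
      have heq : lower = v := by simpa using hs
      have : pvFt lower.toList = v.toList := key.mp (Or.inr (by rw [heq]))
      exact hb (by rw [this]; simp)
  | true =>
    simp only [beq_iff_eq] at hb
    have hft : pvFt lower.toList = v.toList := by
      have := congrArg String.toList hb
      simpa using this
    rcases key.mpr hft with hpre | heq
    · simp only [Bool.or_eq_true]
      left
      have : PySem.Str.startswith lower (v ++ " ")
          = PySem.Chars.startswith lower.toList (v ++ " ").toList := by simp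
      rw [this]
      exact (PySem.Chars.startswith_iff _ _).mpr (by simpa using hpre)
    · simp only [Bool.or_eq_true]
      right
      simpa using String.toList_inj.mp heq
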